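-- pv_equiv track=rewrite | github.com/struphy-hub/struphy | src/struphy/feec/utilities_local_projectors.py | get_sparsity_pattern_periodic
-- ===== SOURCE A (Python) =====
-- def get_sparsity_pattern_periodic(p, S_nbasis, starts, ends, modr, modl):
--     """Using the information about the BasisProjectionOperatorsLocals sparsity pattern this function returns a list with the
--     columns that will have non-zero entries for the rows that belong to the current MPI rank. This particular function works for
--     periodic boundary conditions.
--
--     Parameters
--     ----------
--     p : int
--         Denotes the degree of the B-splines for the relevant spatial direction.
--
--     S_nbasis : int
--         Number of splines in the relevant spatial direction (could be B or D splines depending on the case).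
--
--     starts : int
--         start index of the FE coefficients the current MPI rank is responsible for in the relevant direction.
--
--     ends : int
--         end index of the FE coefficients the current MPI rank is responsible for in the relevant direction.
--
--     modr : int
--         Determines the maximum column that is not zero in the basis projection operator. This column has a value
--         of j = i+p+modr, with i being the row index.
--
--     modl : int
--         Determines the minimum column that is not zero in the basis projection operator. This column has a value
--         of j = i-p+modl, with i being the row index.
--     """
--     # Compute the number of non-zero columns
--     N_non_zero = 2 * p + modr - modl + 1
--
--     # Handle the case where all basis functions are nonzero
--     if N_non_zero >= S_nbasis:
--         return list(range(S_nbasis))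
--
--     # Compute the indices
--     aux_indices = [(starts + j) % S_nbasis for j in range(-p + modl, p + modr + 1)]
--     for cont, j in enumerate(range(starts + 1, ends + 1), start=1):
--         next_index = (starts + p + modr + cont) % S_nbasis
--         if next_index == aux_indices[0]:
--             break
--         aux_indices.append(next_index)
--
--     return aux_indices
-- ===== SOURCE B (Python) =====
-- def get_sparsity_pattern_periodic(p, S_nbasis, starts, ends, modr, modl):
--     # Closed-form: the result is a contiguous cyclic run starting at (starts - p + modl) % S_nbasis.
--     N_non_zero = 2 * p + modr - modl + 1
--
--     # Handle the case where all basis functions are nonzero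
--     if N_non_zero >= S_nbasis:
--         return list(range(S_nbasis))
--
--     length = min(N_non_zero + max(0, ends - starts), S_nbasis)
--     if length <= 0:
--         return []
--     start0 = (starts - p + modl) % S_nbasis
--     return [(start0 + k) % S_nbasis for k in range(length)]
-- ===== Notes on version B (the rewrite author's own statement) =====
-- stated objective: simpler
-- what changed: B replaces A's element-by-element append loop with its modular break test by a closed-form run length length = min(N_non_zero + max(0, ends - starts), S_nbasis) and emits the cyclic run [(start0 + k) % S_nbasis for k in range(length)] directly.
import Mathlib
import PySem

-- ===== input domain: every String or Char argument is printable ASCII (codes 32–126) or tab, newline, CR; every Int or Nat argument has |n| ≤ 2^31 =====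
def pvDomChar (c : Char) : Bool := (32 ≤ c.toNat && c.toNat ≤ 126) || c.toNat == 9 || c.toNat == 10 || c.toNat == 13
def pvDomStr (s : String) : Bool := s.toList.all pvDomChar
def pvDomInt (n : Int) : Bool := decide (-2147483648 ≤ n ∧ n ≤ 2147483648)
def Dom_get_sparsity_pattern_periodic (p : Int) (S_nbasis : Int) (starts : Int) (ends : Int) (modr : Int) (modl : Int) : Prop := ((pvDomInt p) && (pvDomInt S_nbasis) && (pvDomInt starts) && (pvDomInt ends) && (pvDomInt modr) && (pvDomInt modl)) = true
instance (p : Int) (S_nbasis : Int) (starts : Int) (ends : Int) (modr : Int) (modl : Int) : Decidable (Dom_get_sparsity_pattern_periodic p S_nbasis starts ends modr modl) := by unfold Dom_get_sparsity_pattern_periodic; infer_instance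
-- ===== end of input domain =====

-- B replaces A's append loop (with its modular break condition) by a closed-form run length
-- and a single comprehension over that cyclic run: objective 'simpler' (same asymptotic cost).


-- ===== PORT A =====
-- A's `for cont, j in enumerate(range(starts+1, ends+1), start=1): …` loop with its break;
-- `base` is the loop-invariant subexpression starts + p + modr, `first` is aux_indices[0]
-- (the list head, which the loop never changes).
def pvLoopA (S base first : Int) (conts : List Int) (acc : List Int) : List Int :=
  match conts with
  | [] => acc
  | c :: rest =>
      let next := PySem.Int.mod (base + c) S
      if next = first then acc
      else pvLoopA S base first rest (acc ++ [next])

def get_sparsity_pattern_periodic (p : Int) (S_nbasis : Int) (starts : Int) (ends : Int) (modr : Int) (modl : Int) : List Int :=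
  let N_non_zero := 2 * p + modr - modl + 1
  if N_non_zero ≥ S_nbasis then PySem.List.pyRange 0 S_nbasis 1
  else
    let aux := (PySem.List.pyRange (-p + modl) (p + modr + 1) 1).map
                 (fun j => PySem.Int.mod (starts + j) S_nbasis)
    match aux with
    | [] => aux  -- here Python raises IndexError on aux[0] if the loop runs: excluded by Pre_
    | first :: _ =>
        pvLoopA S_nbasis (starts + p + modr) first
          (PySem.List.pyRange 1 (ends - starts + 1) 1) aux

-- ===== PORT B =====
def get_sparsity_pattern_periodic_alt (p : Int) (S_nbasis : Int) (starts : Int) (ends : Int) (modr : Int) (modl : Int) : List Int :=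
  let N_non_zero := 2 * p + modr - modl + 1
  if N_non_zero ≥ S_nbasis then PySem.List.pyRange 0 S_nbasis 1
  else
    let length := min (N_non_zero + max 0 (ends - starts)) S_nbasis
    if length ≤ 0 then []
    else
      let start0 := PySem.Int.mod (starts - p + modl) S_nbasis
      (PySem.List.pyRange 0 length 1).map (fun k => PySem.Int.mod (start0 + k) S_nbasis)

-- ===== PRECONDITION & SPEC =====
-- Pre_ excludes exactly the inputs where A raises: when N_non_zero ≤ 0 (< S_nbasis) and the loop
-- runs (starts < ends), Python hits aux_indices[0] on an empty list (IndexError) or `% 0`.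
def Pre_get_sparsity_pattern_periodic (p : Int) (S_nbasis : Int) (starts : Int) (ends : Int) (modr : Int) (modl : Int) : Prop :=
  1 ≤ 2 * p + modr - modl + 1 ∨ S_nbasis ≤ 2 * p + modr - modl + 1 ∨ ends ≤ starts
instance (p : Int) (S_nbasis : Int) (starts : Int) (ends : Int) (modr : Int) (modl : Int) : Decidable (Pre_get_sparsity_pattern_periodic p S_nbasis starts ends modr modl) := by unfold Pre_get_sparsity_pattern_periodic; infer_instance

def pvWitness_get_sparsity_pattern_periodic : Int × Int × Int × Int × Int × Int := (1, 5, 0, 2, 0, 0)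

def Spec_get_sparsity_pattern_periodic (p : Int) (S_nbasis : Int) (starts : Int) (ends : Int) (modr : Int) (modl : Int) (out : List Int) : Prop := out = get_sparsity_pattern_periodic_alt p S_nbasis starts ends modr modl
instance (p : Int) (S_nbasis : Int) (starts : Int) (ends : Int) (modr : Int) (modl : Int) (out : List Int) : Decidable (Spec_get_sparsity_pattern_periodic p S_nbasis starts ends modr modl out) := by unfold Spec_get_sparsity_pattern_periodic; infer_instance

-- ===== CLAIM (what is proved, stated in full; the proofs are below) =====
def Claim_equal_get_sparsity_pattern_periodic : Prop := ∀ (p : Int) (S_nbasis : Int) (starts : Int) (ends : Int) (modr : Int) (modl : Int), Dom_get_sparsity_pattern_periodic p S_nbasis starts ends modr modl → Pre_get_sparsity_pattern_periodic p S_nbasis starts ends modr modl → Spec_get_sparsity_pattern_periodic p S_nbasis starts ends modr modl (get_sparsity_pattern_periodic p S_nbasis starts ends modr modl)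

-- ===== LEMMAS AND PROOFS =====

-- the cyclic run of length n starting at a (mod S): both programs produce lists of this shape
def pmr (a S : Int) (n : Nat) : List Int :=
  (List.range n).map (fun (t : Nat) => PySem.Int.mod (a + (t : Int)) S)

lemma pmr_succ (a S : Int) (n : Nat) :
    pmr a S (n + 1) = pmr a S n ++ [PySem.Int.mod (a + (n : Int)) S] := by
  simp [pmr, List.range_succ]

lemma pmr_head (a S : Int) (n : Nat) :
    ∃ tl, pmr a S (n + 1) = PySem.Int.mod a S :: tl := by
  obtain ⟨x, tl, h⟩ := List.exists_cons_of_ne_nil (l := pmr a S (n + 1)) (by simp [pmr])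
  have hx := congrArg (fun l => l[0]?) h
  simp [pmr] at hx
  exact ⟨tl, by rw [h, ← hx]⟩

lemma mod_mod_add (a t S : Int) (hS : 0 < S) :
    PySem.Int.mod (PySem.Int.mod a S + t) S = PySem.Int.mod (a + t) S := by
  rw [PySem.Int.mod_eq_emod_of_pos hS, PySem.Int.mod_eq_emod_of_pos hS,
      PySem.Int.mod_eq_emod_of_pos hS, Int.add_emod, Int.emod_emod_of_dvd _ dvd_rfl,
      ← Int.add_emod]

-- characterisation of A's loop: with acc the run of length m (1 ≤ m ≤ S) starting at a,
-- and conts a range of E further counters, the loop extends the run up to length min (m+E) S.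
lemma loopA_char (E : Nat) : ∀ (m : Nat) (a S c₀ base : Int), 0 < S →
    base + c₀ = a + (m : Int) → 1 ≤ m → (m : Int) ≤ S →
    pvLoopA S base (PySem.Int.mod a S) (PySem.List.pyRange c₀ (c₀ + (E : Int)) 1) (pmr a S m)
      = pmr a S (min (m + E) S.toNat) := by
  induction E with
  | zero =>
      intro m a S c₀ base hS hb hm1 hmS
      rw [show c₀ + ((0 : Nat) : Int) = c₀ by push_cast; omega,
          PySem.List.pyRange_one_eq_nil (le_refl c₀)]
      simp only [pvLoopA]
      congr 1
      omega
  | succ E ih =>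
      intro m a S c₀ base hS hb hm1 hmS
      rw [show PySem.List.pyRange c₀ (c₀ + ((E + 1 : Nat) : Int)) 1
            = c₀ :: PySem.List.pyRange (c₀ + 1) ((c₀ + 1) + (E : Int)) 1 by
          rw [PySem.List.pyRange_one_cons (by push_cast; omega), show c₀ + ((E + 1 : Nat) : Int) = (c₀ + 1) + (E : Int) by push_cast; ring]]
      simp only [pvLoopA, hb]
      by_cases hm : (m : Int) = S
      · have heq : PySem.Int.mod (a + (m : Int)) S = PySem.Int.mod a S := by
          rw [hm, PySem.Int.mod_eq_emod_of_pos hS, PySem.Int.mod_eq_emod_of_pos hS]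
          simp
        rw [if_pos heq]
        congr 1
        omega
      · have hne : PySem.Int.mod (a + (m : Int)) S ≠ PySem.Int.mod a S := by
          rw [PySem.Int.mod_eq_emod_of_pos hS, PySem.Int.mod_eq_emod_of_pos hS]
          intro h
          have hdvd : S ∣ (m : Int) := by
            have := (Int.emod_emod_of_dvd a (dvd_refl S))
            have h0 : ((a + (m : Int)) - a) % S = 0 := by
              rw [Int.sub_emod, h]; simp
            have : ((m : Int)) % S = 0 := by
              simpa using h0
            exact Int.dvd_of_emod_eq_zero this
          have := Int.le_of_dvd (by exact_mod_cast hm1) hdvd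
          omega
        rw [if_neg hne, ← pmr_succ]
        rw [ih (m + 1) a S (c₀ + 1) base hS (by push_cast; omega)
            (by omega) (by omega)]
        congr 1
        omega

-- ===== VERDICT (by name: the statement is the Claim_ definition above) =====
theorem get_sparsity_pattern_periodic_spec : Claim_equal_get_sparsity_pattern_periodic := by
  intro p S starts ends modr modl _hDom hPre
  unfold Spec_get_sparsity_pattern_periodic
  unfold get_sparsity_pattern_periodic get_sparsity_pattern_periodic_alt
  by_cases hbig : 2 * p + modr - modl + 1 ≥ S
  · simp only [if_pos hbig]
  · simp only [if_neg hbig]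
    by_cases hN1 : 1 ≤ 2 * p + modr - modl + 1
    · -- main case: 1 ≤ N < S
      have hS : 0 < S := by omega
      have haux : (PySem.List.pyRange (-p + modl) (p + modr + 1) 1).map
            (fun j => PySem.Int.mod (starts + j) S)
          = pmr (starts - p + modl) S (2 * p + modr - modl + 1).toNat := by
        rw [PySem.List.pyRange_one, List.map_map,
            show (p + modr + 1) - (-p + modl) = 2 * p + modr - modl + 1 by ring]
        unfold pmr
        apply List.map_congr_left
        intro k _
        simp only [Function.comp]
        congr 1
        omega
      obtain ⟨n, hn⟩ : ∃ n, (2 * p + modr - modl + 1).toNat = n + 1 :=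
        ⟨(2 * p + modr - modl + 1).toNat - 1, by omega⟩
      have hnN : ((n : Int) + 1) = 2 * p + modr - modl + 1 := by omega
      obtain ⟨tl, htl⟩ := pmr_head (starts - p + modl) S n
      rw [haux, hn, htl]
      rw [show PySem.List.pyRange 1 (ends - starts + 1) 1
            = PySem.List.pyRange 1 (1 + ((ends - starts).toNat : Int)) 1 by
          by_cases h : starts ≤ ends
          · congr 1; omega
          · rw [PySem.List.pyRange_one_eq_nil (by omega),
                PySem.List.pyRange_one_eq_nil (by omega)]]
      show pvLoopA S (starts + p + modr) (PySem.Int.mod (starts - p + modl) S)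
          (PySem.List.pyRange 1 (1 + ((ends - starts).toNat : Int)) 1)
          (PySem.Int.mod (starts - p + modl) S :: tl) = _
      rw [← htl]
      rw [loopA_char ((ends - starts).toNat) (n + 1) (starts - p + modl) S 1 (starts + p + modr)
          hS (by push_cast; omega) (by omega) (by push_cast; omega)]
      have hlen0 : ¬ min (2 * p + modr - modl + 1 + max 0 (ends - starts)) S ≤ 0 := by omega
      rw [if_neg hlen0, PySem.List.pyRange_one, List.map_map]
      rw [show (min (n + 1 + (ends - starts).toNat) S.toNat)
            = (min (2 * p + modr - modl + 1 + max 0 (ends - starts)) S - 0).toNat by omega]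
      unfold pmr
      apply List.map_congr_left
      intro k _
      simp only [Function.comp]
      rw [show (0 : Int) + (k : Int) = (k : Int) by ring, mod_mod_add _ _ _ hS]
    · -- degenerate case: N ≤ 0, so ends ≤ starts by Pre_; both sides are []
      have hes : ends ≤ starts := by
        unfold Pre_get_sparsity_pattern_periodic at hPre
        omega
      rw [PySem.List.pyRange_one_eq_nil (show p + modr + 1 ≤ -p + modl by omega)]
      simp only [List.map_nil]
      rw [if_pos (show min (2 * p + modr - modl + 1 + max 0 (ends - starts)) S ≤ 0 by omega)]
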